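-- pv_equiv track=rewrite | github.com/Taoge123/OptimizedLeetcode | LeetcodeNew/python/LC_906.py | constructPalin
-- ===== SOURCE A (Python) =====
-- def constructPalin(num, odd):
--     pal = num
--     if odd == 1:
--         num //= 10
--
--     # doing reverse number for the second half of palindrome number
--     while num > 0:
--         pal = pal * 10 + num % 10
--         num //= 10
--     return pal
-- ===== SOURCE B (Python) =====
-- def constructPalin(num, odd):
--     # Build the digit list of num from its string form, then construct the
--     # whole palindrome digit sequence and fold it back into an integer.
--     digits = [ord(c) - 48 for c in str(num)]
--     half = digits[:-1] if odd == 1 else digits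
--     pal = 0
--     for d in digits + half[::-1]:
--         pal = pal * 10 + d
--     return pal
-- ===== Notes on version B (the rewrite author's own statement) =====
-- stated objective: idiomatic
-- what changed: A peels digits off num arithmetically while multiply-accumulating into pal; B builds the palindrome's full digit sequence from str(num) (dropping the last digit when odd == 1, appending the reversed half) and folds it once into an integer.
-- outside the precondition, e.g. on constructPalin(-7, 0): A returns -7, B returns -2233; on constructPalin(-123, 1): A returns -123, B returns -2876793
import Mathlib
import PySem

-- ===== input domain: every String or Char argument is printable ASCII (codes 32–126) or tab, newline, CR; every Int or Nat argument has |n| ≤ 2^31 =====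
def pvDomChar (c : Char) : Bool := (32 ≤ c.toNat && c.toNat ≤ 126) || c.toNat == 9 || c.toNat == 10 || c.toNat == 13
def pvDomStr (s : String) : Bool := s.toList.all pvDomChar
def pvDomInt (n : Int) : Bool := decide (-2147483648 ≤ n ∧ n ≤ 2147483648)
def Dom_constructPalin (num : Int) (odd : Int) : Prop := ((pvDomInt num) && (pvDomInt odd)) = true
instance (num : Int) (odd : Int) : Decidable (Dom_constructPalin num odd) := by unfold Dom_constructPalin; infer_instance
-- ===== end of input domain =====

-- B builds the palindrome's digit sequence from str(num) and folds it once,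
-- instead of A's arithmetic digit-peeling loop (objective: idiomatic; same cost).

-- ===== PORT A =====
-- while num > 0: pal = pal * 10 + num % 10; num //= 10
def pvLoopA (pal num : Int) : Int :=
  if 0 < num then
    pvLoopA (pal * 10 + PySem.Int.mod num 10) (PySem.Int.floordiv num 10)
  else pal
termination_by num.toNat
decreasing_by
  simp only [PySem.Int.floordiv, Int.fdiv_eq_ediv]
  omega

def constructPalin (num : Int) (odd : Int) : Int :=
  let num2 := if odd == 1 then PySem.Int.floordiv num 10 else num
  pvLoopA num num2

-- ===== PORT B =====
def constructPalin_alt (num : Int) (odd : Int) : Int :=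
  let digits : List Int := (PySem.Int.toChars num).map (fun c => (c.toNat : Int) - 48)
  let half : List Int := if odd == 1 then PySem.List.slice digits none (some (-1)) else digits
  let revHalf : List Int := (PySem.List.slice? half none none (-1)).getD []  -- half[::-1]
  (digits ++ revHalf).foldl (fun pal d => pal * 10 + d) 0

-- ===== PRECONDITION & SPEC =====
-- Pre_ excludes negative num, which lies outside the natural domain of this digit-palindrome
-- constructor (LeetCode 906 builds palindromes from positive halves): there A's loop never
-- runs and it returns num unchanged, while B's string digits mis-read the '-' sign.
def Pre_constructPalin (num : Int) (odd : Int) : Prop := 0 ≤ num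
instance (num : Int) (odd : Int) : Decidable (Pre_constructPalin num odd) := by
  unfold Pre_constructPalin; infer_instance

def pvWitness_constructPalin : Int × Int := (123, 1)

def Spec_constructPalin (num : Int) (odd : Int) (out : Int) : Prop := out = constructPalin_alt num odd
instance (num : Int) (odd : Int) (out : Int) : Decidable (Spec_constructPalin num odd out) := by
  unfold Spec_constructPalin; infer_instance

-- ===== CLAIM (what is proved, stated in full; the proofs are below) =====
def Claim_equal_constructPalin : Prop := ∀ (num : Int) (odd : Int), Dom_constructPalin num odd → Pre_constructPalin num odd → Spec_constructPalin num odd (constructPalin num odd)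

-- ===== LEMMAS AND PROOFS =====

-- digit list of n, most significant first, as integers
def pvD (n : Nat) : List Int := ((Nat.digits 10 n).reverse).map (fun d : Nat => (d : Int))

-- B's digit list for a nonnegative number (str(0) = "0")
def pvDigitsB (n : Nat) : List Int := if n = 0 then [0] else pvD n

lemma pvDigitChar_val {d : Nat} (hd : d < 10) :
    ((Nat.digitChar d).toNat : Int) - 48 = (d : Int) := by
  interval_cases d <;> decide

lemma pvToDigitsCore_eq (n : Nat) : ∀ (fuel : Nat) (ds : List Char), n < fuel → 0 < n →
    Nat.toDigitsCore 10 fuel n ds = ((Nat.digits 10 n).reverse.map Nat.digitChar) ++ ds := by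
  induction n using Nat.strong_induction_on with
  | _ n ih =>
    intro fuel ds hfuel hpos
    cases fuel with
    | zero => omega
    | succ fuel =>
      rw [Nat.toDigitsCore]
      have hdig : Nat.digits 10 n = n % 10 :: Nat.digits 10 (n / 10) :=
        Nat.digits_def' (by norm_num) hpos
      rw [hdig]
      simp only [List.reverse_cons, List.map_append, List.map_cons, List.map_nil]
      by_cases h0 : n / 10 = 0
      · simp [h0]
      · have hlt : n / 10 < n := Nat.div_lt_self hpos (by norm_num)
        rw [if_neg h0, ih (n / 10) hlt fuel _ (by omega) (by omega)]
        simp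

lemma pvMapToChars (n : Nat) :
    (PySem.Int.toChars (n : Int)).map (fun c => (c.toNat : Int) - 48) = pvDigitsB n := by
  by_cases h0 : n = 0
  · subst h0; decide
  · have hpos : 0 < n := Nat.pos_of_ne_zero h0
    unfold PySem.Int.toChars Nat.toDigits
    rw [if_neg (by omega)]
    have : (n : Int).toNat = n := by omega
    rw [this, pvToDigitsCore_eq n (n + 1) [] (by omega) hpos, pvDigitsB, if_neg h0, pvD,
      List.append_nil, List.map_map]
    apply List.map_congr_left
    intro d hd
    have hd10 : d < 10 := Nat.digits_lt_base (by norm_num) (List.mem_reverse.mp hd)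
    exact pvDigitChar_val hd10

lemma pvD_succ (n : Nat) (h : 0 < n) : pvD n = pvD (n / 10) ++ [((n % 10 : Nat) : Int)] := by
  unfold pvD
  rw [Nat.digits_def' (b := 10) (by norm_num) h]
  simp

lemma pvFold_msb (n : Nat) : ∀ pal : Int,
    List.foldl (fun pal d => pal * 10 + d) pal (pvD n)
      = pal * (10 : Int) ^ (Nat.digits 10 n).length + n := by
  induction n using Nat.strong_induction_on with
  | _ n ih =>
    intro pal
    by_cases h0 : n = 0
    · subst h0; simp [pvD]
    · have hpos : 0 < n := Nat.pos_of_ne_zero h0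
      rw [pvD_succ n hpos, List.foldl_append,
        ih (n / 10) (Nat.div_lt_self hpos (by norm_num)) pal,
        Nat.digits_def' (b := 10) (by norm_num) hpos]
      simp only [List.foldl_cons, List.foldl_nil, List.length_cons]
      have hsplit : (n : Int) = ((n / 10 : Nat) : Int) * 10 + ((n % 10 : Nat) : Int) := by
        push_cast; omega
      rw [pow_succ]
      nlinarith [hsplit]

lemma pvFold_digitsB_zero (n : Nat) :
    List.foldl (fun pal d => pal * 10 + d) 0 (pvDigitsB n) = (n : Int) := by
  by_cases h0 : n = 0
  · subst h0; decide
  · rw [pvDigitsB, if_neg h0, pvFold_msb]; ring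

lemma pvLoopA_lsb (m : Nat) : ∀ pal : Int,
    pvLoopA pal (m : Int)
      = List.foldl (fun pal d => pal * 10 + d) pal ((Nat.digits 10 m).map (fun d : Nat => (d : Int))) := by
  induction m using Nat.strong_induction_on with
  | _ m ih =>
    intro pal
    rw [pvLoopA]
    by_cases h0 : m = 0
    · subst h0; simp
    · have hpos : 0 < m := Nat.pos_of_ne_zero h0
      rw [if_pos (by omega)]
      have hmod : PySem.Int.mod (m : Int) 10 = ((m % 10 : Nat) : Int) := by
        rw [PySem.Int.mod, Int.fmod_eq_emod, if_pos (Or.inl (by norm_num))]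
        push_cast; omega
      have hdiv : PySem.Int.floordiv (m : Int) 10 = ((m / 10 : Nat) : Int) := by
        rw [PySem.Int.floordiv, Int.fdiv_eq_ediv, if_pos (Or.inl (by norm_num))]
        push_cast; omega
      rw [hmod, hdiv, ih (m / 10) (Nat.div_lt_self hpos (by norm_num)),
        Nat.digits_def' (b := 10) (by norm_num) hpos]
      simp

lemma pvRev_pvD (m : Nat) : (pvD m).reverse = (Nat.digits 10 m).map (fun d : Nat => (d : Int)) := by
  rw [pvD, List.map_reverse, List.reverse_reverse]

lemma pvDropLast_digitsB (n : Nat) : (pvDigitsB n).dropLast = pvD (n / 10) := by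
  by_cases h0 : n = 0
  · subst h0; decide
  · rw [pvDigitsB, if_neg h0, pvD_succ n (Nat.pos_of_ne_zero h0), List.dropLast_concat]

-- ===== VERDICT (by name: the statement is the Claim_ definition above) =====
theorem constructPalin_spec : Claim_equal_constructPalin := by
  intro num odd _ hpre
  unfold Spec_constructPalin constructPalin constructPalin_alt
  obtain ⟨n, rfl⟩ : ∃ n : Nat, num = (n : Int) :=
    ⟨num.toNat, (Int.toNat_of_nonneg hpre).symm⟩
  simp only [PySem.List.slice?_none_none_neg_one, Option.getD_some, pvMapToChars,
    PySem.List.slice_to_neg_one]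
  by_cases hodd : odd = 1
  · -- half = digits[:-1]
    simp only [hodd, beq_self_eq_true, if_pos]
    have hdiv : PySem.Int.floordiv (n : Int) 10 = ((n / 10 : Nat) : Int) := by
      rw [PySem.Int.floordiv, Int.fdiv_eq_ediv, if_pos (Or.inl (by norm_num))]
      push_cast; omega
    rw [hdiv, pvLoopA_lsb, List.foldl_append, pvFold_digitsB_zero,
      pvDropLast_digitsB, pvRev_pvD]
  · have hbe : (odd == 1) = false := by simp [hodd]
    simp only [hbe, Bool.false_eq_true, if_false]
    by_cases h0 : n = 0
    · subst h0
      rw [pvLoopA]; decide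
    · rw [List.foldl_append, pvFold_digitsB_zero, pvDigitsB, if_neg h0, pvRev_pvD,
        pvLoopA_lsb]
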